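-- pv_equiv track=rewrite | github.com/peytontolbert/LLMAgentSystem | app/agents/meta_learning_agent.py | _parse_text_implementation_plan
-- ===== SOURCE A (Python) =====
-- from typing import List, Dict, Any
--
-- def _parse_text_implementation_plan(plan: str) -> List[Dict[str, Any]]:
--     lines = plan.split('\n')
--     steps = []
--     current_step = {}
--     for line in lines:
--         line = line.strip()
--         if line.startswith("Step ") or (current_step and line == ""):
--             if current_step:
--                 steps.append(current_step)
--                 current_step = {}
--         elif ':' in line:
--             key, value = line.split(':', 1)
--             current_step[key.strip().lower()] = value.strip()
--     if current_step:
--         steps.append(current_step)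
--     return steps
-- ===== SOURCE B (Python) =====
-- def _parse_text_implementation_plan(plan):
--     # Two-phase: segment stripped lines into runs at delimiter lines, then parse each run.
--     stripped = [ln.strip() for ln in plan.split('\n')]
--     groups, cur = [], []
--     for ln in stripped:
--         if ln.startswith("Step ") or ln == "":
--             if cur:
--                 groups.append(cur)
--                 cur = []
--         else:
--             cur.append(ln)
--     if cur:
--         groups.append(cur)
--     steps = []
--     for g in groups:
--         d = {}
--         for ln in g:
--             if ':' in ln:
--                 k, v = ln.split(':', 1)
--                 d[k.strip().lower()] = v.strip()
--         if d:
--             steps.append(d)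
--     return steps
-- ===== Notes on version B (the rewrite author's own statement) =====
-- stated objective: alternative
-- what changed: Replaced A's single-pass accumulate-and-flush loop (steps list + mutable current dict with flush logic inside the loop) by a two-phase decomposition: first segment the stripped lines into maximal runs at delimiter lines (line starts with 'Step ' or is empty), then parse each run's colon-bearing lines into a dict and keep the non-empty dicts.
import Mathlib
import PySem

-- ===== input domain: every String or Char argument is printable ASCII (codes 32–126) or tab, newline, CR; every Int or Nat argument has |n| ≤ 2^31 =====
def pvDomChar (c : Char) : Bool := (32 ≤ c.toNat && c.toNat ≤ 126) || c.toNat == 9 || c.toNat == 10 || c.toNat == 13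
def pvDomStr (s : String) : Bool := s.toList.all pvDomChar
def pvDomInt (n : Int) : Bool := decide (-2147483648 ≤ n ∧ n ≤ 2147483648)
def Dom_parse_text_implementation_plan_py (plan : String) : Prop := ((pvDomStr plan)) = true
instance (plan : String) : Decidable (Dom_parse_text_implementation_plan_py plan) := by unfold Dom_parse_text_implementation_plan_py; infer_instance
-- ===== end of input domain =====

-- B replaces A's single-pass accumulate-and-flush with a two-phase segment-then-parse decomposition (objective: alternative/simpler structure; same cost).

-- ===== PORT A =====
-- one loop step of A on the already-stripped line: state = (steps so far, current_step dict)
def pvStepBody (acc : List (List (String × String)) × PySem.Dict String String) (line : String) :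
    List (List (String × String)) × PySem.Dict String String :=
  if PySem.Str.startswith line "Step " || (!acc.2.items.isEmpty && line == "") then
    if !acc.2.items.isEmpty then (acc.1 ++ [acc.2.items], PySem.Dict.empty) else acc
  else if PySem.Str.isIn ":" line then
    match PySem.Str.splitMax? line ":" 1 with
    | some (key :: value :: _) =>
        (acc.1, acc.2.insert (PySem.Str.lower (PySem.Str.strip key)) (PySem.Str.strip value))
    | _ => acc  -- unreachable: ':' in line guarantees a 2-part split
  else acc

-- A's loop body: line = line.strip(), then the branches
def pvStepA (acc : List (List (String × String)) × PySem.Dict String String) (line0 : String) :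
    List (List (String × String)) × PySem.Dict String String :=
  pvStepBody acc (PySem.Str.strip line0)

def parse_text_implementation_plan_py (plan : String) : List (List (String × String)) :=
  let lines := (PySem.Str.split? plan "\n").getD []   -- sep "\n" ≠ "", so split? is always some
  let st := lines.foldl pvStepA ([], PySem.Dict.empty)
  if !st.2.items.isEmpty then st.1 ++ [st.2.items] else st.1

-- ===== PORT B =====
def pvIsDelim (line : String) : Bool :=
  PySem.Str.startswith line "Step " || line == ""

-- phase 1: split the stripped lines into maximal runs of non-delimiter lines
def pvSegStep (acc : List (List String) × List String) (ln : String) :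
    List (List String) × List String :=
  if pvIsDelim ln then
    (if !acc.2.isEmpty then (acc.1 ++ [acc.2], []) else acc)
  else (acc.1, acc.2 ++ [ln])

def pvSegment (lines : List String) : List (List String) :=
  let st := lines.foldl pvSegStep ([], [])
  if !st.2.isEmpty then st.1 ++ [st.2] else st.1

-- phase 2: build one dict out of a run's ':'-bearing lines
def pvParseGroup (g : List String) : PySem.Dict String String :=
  g.foldl (fun d ln =>
    if PySem.Str.isIn ":" ln then
      match PySem.Str.splitMax? ln ":" 1 with
      | some (key :: value :: _) =>
          d.insert (PySem.Str.lower (PySem.Str.strip key)) (PySem.Str.strip value)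
      | _ => d
    else d) PySem.Dict.empty

def parse_text_implementation_plan_py_alt (plan : String) : List (List (String × String)) :=
  let stripped := (((PySem.Str.split? plan "\n").getD []).map PySem.Str.strip)
  ((pvSegment stripped).map (fun g => (pvParseGroup g).items)).filter (fun d => !d.isEmpty)

-- ===== PRECONDITION & SPEC =====
def Spec_parse_text_implementation_plan_py (plan : String) (out : List (List (String × String))) : Prop := out = parse_text_implementation_plan_py_alt plan
instance (plan : String) (out : List (List (String × String))) : Decidable (Spec_parse_text_implementation_plan_py plan out) := by unfold Spec_parse_text_implementation_plan_py; infer_instance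

-- ===== CLAIM (what is proved, stated in full; the proofs are below) =====
def Claim_equal_parse_text_implementation_plan_py : Prop := ∀ (plan : String), Dom_parse_text_implementation_plan_py plan → Spec_parse_text_implementation_plan_py plan (parse_text_implementation_plan_py plan)

-- ===== LEMMAS AND PROOFS =====

-- B's phase-2 output of a list of groups
def pvOut (gs : List (List String)) : List (List (String × String)) :=
  (gs.map (fun g => (pvParseGroup g).items)).filter (fun d => !d.isEmpty)

theorem pvOut_append_singleton (gs : List (List String)) (g : List String) :
    pvOut (gs ++ [g]) =
      pvOut gs ++ (if !(pvParseGroup g).items.isEmpty then [(pvParseGroup g).items] else []) := by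
  simp [pvOut, List.filter_append]
  split <;> simp_all

theorem pvParseGroup_nil : pvParseGroup [] = PySem.Dict.empty := rfl

theorem pvParseGroup_empty_items (g : List String) (h : (pvParseGroup g).items = []) :
    pvParseGroup g = PySem.Dict.empty := by
  apply PySem.Dict.ext
  simpa using h

theorem pvParseGroup_append_singleton (g : List String) (ln : String) :
    pvParseGroup (g ++ [ln]) =
      (if PySem.Str.isIn ":" ln then
        match PySem.Str.splitMax? ln ":" 1 with
        | some (key :: value :: _) =>
            (pvParseGroup g).insert (PySem.Str.lower (PySem.Str.strip key)) (PySem.Str.strip value)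
        | _ => pvParseGroup g
      else pvParseGroup g) := by
  simp [pvParseGroup, List.foldl_append]

theorem pvEmptyItems : (PySem.Dict.empty : PySem.Dict String String).items = [] := rfl

theorem pvSWnil : PySem.Chars.startswith ([] : List Char) ['S','t','e','p',' '] = false := by decide

theorem pvColonNil : PySem.Chars.isIn [':'] ([] : List Char) = false := by decide

-- the loop invariant: A's loop body on a stripped line tracks B's segmentation step
theorem pvStep_inv (l : String) (gs : List (List String)) (curg : List String) :
    pvStepBody (pvOut gs, pvParseGroup curg) l =
      (pvOut (pvSegStep (gs, curg) l).1, pvParseGroup (pvSegStep (gs, curg) l).2) := by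
  unfold pvStepBody pvSegStep pvIsDelim
  by_cases hni : (pvParseGroup curg).items = []
  · have hq : pvParseGroup curg = PySem.Dict.empty := pvParseGroup_empty_items curg hni
    by_cases hsw : PySem.Chars.startswith l.toList ['S','t','e','p',' '] = true
    · by_cases hcg : curg = []
      · simp [hsw, hcg, pvParseGroup_nil, pvEmptyItems]
      · simp [hsw, hcg, hq, pvOut_append_singleton, pvParseGroup_nil, pvEmptyItems]
    · by_cases hemp : l = ""
      · subst hemp
        by_cases hcg : curg = []
        · simp [hcg, pvParseGroup_nil, pvEmptyItems, pvSWnil, pvColonNil]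
        · simp [hcg, hq, pvOut_append_singleton, pvParseGroup_nil, pvEmptyItems, pvSWnil, pvColonNil]
      · by_cases hc : PySem.Chars.isIn [':'] l.toList = true
        · cases hsp : PySem.Str.splitMax? l ":" 1 with
          | none => simp [hsw, hemp, hc, hsp, pvParseGroup_append_singleton]
          | some parts =>
            cases parts with
            | nil => simp [hsw, hemp, hc, hsp, pvParseGroup_append_singleton]
            | cons k rest =>
              cases rest with
              | nil => simp [hsw, hemp, hc, hsp, pvParseGroup_append_singleton]
              | cons v t => simp [hsw, hemp, hc, hsp, pvParseGroup_append_singleton]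
        · simp [hsw, hemp, hc, pvParseGroup_append_singleton]
  · have hcg : ¬ curg = [] := by intro h; subst h; exact hni rfl
    have hni' : (pvParseGroup curg).items.isEmpty = false := by
      simpa [List.isEmpty_eq_false_iff] using hni
    by_cases hsw : PySem.Chars.startswith l.toList ['S','t','e','p',' '] = true
    · simp [hsw, hni', hcg, pvOut_append_singleton, pvParseGroup_nil]
    · by_cases hemp : l = ""
      · subst hemp
        simp [hni', hcg, pvOut_append_singleton, pvParseGroup_nil, pvSWnil]
      · by_cases hc : PySem.Chars.isIn [':'] l.toList = true
        · cases hsp : PySem.Str.splitMax? l ":" 1 with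
          | none => simp [hsw, hemp, hc, hsp, pvParseGroup_append_singleton]
          | some parts =>
            cases parts with
            | nil => simp [hsw, hemp, hc, hsp, pvParseGroup_append_singleton]
            | cons k rest =>
              cases rest with
              | nil => simp [hsw, hemp, hc, hsp, pvParseGroup_append_singleton]
              | cons v t => simp [hsw, hemp, hc, hsp, pvParseGroup_append_singleton]
        · simp [hsw, hemp, hc, pvParseGroup_append_singleton]

theorem pvInvariant (ls : List String) (gs : List (List String)) (curg : List String) :
    ls.foldl pvStepBody (pvOut gs, pvParseGroup curg) =
      (pvOut (ls.foldl pvSegStep (gs, curg)).1, pvParseGroup (ls.foldl pvSegStep (gs, curg)).2) := by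
  induction ls generalizing gs curg with
  | nil => rfl
  | cons l ls ih =>
    simp only [List.foldl_cons]
    rw [pvStep_inv]
    exact ih _ _

-- ===== VERDICT (by name: the statement is the Claim_ definition above) =====
theorem parse_text_implementation_plan_py_spec : Claim_equal_parse_text_implementation_plan_py := by
  intro plan _
  unfold Spec_parse_text_implementation_plan_py parse_text_implementation_plan_py
    parse_text_implementation_plan_py_alt pvSegment
  dsimp only
  have hmap : ((PySem.Str.split? plan "\n").getD []).foldl pvStepA ([], PySem.Dict.empty) =
      (((PySem.Str.split? plan "\n").getD []).map PySem.Str.strip).foldl pvStepBody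
        ([], PySem.Dict.empty) := by
    rw [List.foldl_map]; rfl
  have h0 : (([], PySem.Dict.empty) : List (List (String × String)) × PySem.Dict String String) =
      (pvOut [], pvParseGroup []) := rfl
  rw [hmap, h0, pvInvariant]
  set st := (((PySem.Str.split? plan "\n").getD []).map PySem.Str.strip).foldl pvSegStep ([], [])
    with hst
  by_cases hni : (pvParseGroup st.2).items = []
  · have hq : pvParseGroup st.2 = PySem.Dict.empty := pvParseGroup_empty_items st.2 hni
    by_cases hcg : st.2 = []
    · simp [hcg, pvParseGroup_nil, pvEmptyItems, pvOut]
    · have hcg' : st.2.isEmpty = false := by simp [hcg]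
      simp [hcg', hq, pvEmptyItems, pvOut]
  · have hcg : st.2 ≠ [] := by intro h; rw [h] at hni; exact hni rfl
    have hni' : (pvParseGroup st.2).items.isEmpty = false := by
      simpa [List.isEmpty_eq_false_iff] using hni
    have hcg' : st.2.isEmpty = false := by simp [hcg]
    simp [hni', hcg', pvOut]
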